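-- pv_equiv track=rewrite | github.com/svtm/adventofcode | DayEleven.py | incr_string
-- ===== SOURCE A (Python) =====
-- def incr_string(string, pos):
--     char = ord(string[pos])
--     char += 1
--     if (char > ord('z')):
--         char = ord('a')
--         string = string[:pos] + chr(char) + string[pos+1:]
--         return incr_string(string, pos-1)
--     string = string[:pos]+chr(char)+string[pos + 1:]
--     return string
-- ===== SOURCE B (Python) =====
-- def incr_string(string, pos):
--     chars = list(string)
--     i = pos + len(chars) if pos < 0 else pos
--     while i >= 0 and chars[i] >= 'z':
--         chars[i] = 'a'
--         i -= 1
--     if i < 0: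
--         chars.insert(0, 'a')
--     else:
--         chars[i] = chr(ord(chars[i]) + 1)
--     return ''.join(chars)
-- ===== Notes on version B (the rewrite author's own statement) =====
-- stated objective: simpler
-- what changed: Replaces A's tail recursion that rebuilds the whole string by slicing with raw (possibly negative) pos at every step with a single char-list walk: normalize the negative index once, sweep the carry leftward in place, then one final write/prepend and join.
-- intended difference: On inputs whose carry walk involves position -1 (pos = -1, or 0 <= pos with s[0..pos] all >= 'z'), A's slice string[pos+1:] with pos = -1 is the whole string, so A returns a duplicated string (e.g. A('z',-1)='bz', A('abc',-1)='abdabc'); B returns the properly incremented string ('aa', 'abd'), which is the intended counter increment. — e.g. on incr_string("z", -1): A returns "bz", B returns "aa"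
import Mathlib
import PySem

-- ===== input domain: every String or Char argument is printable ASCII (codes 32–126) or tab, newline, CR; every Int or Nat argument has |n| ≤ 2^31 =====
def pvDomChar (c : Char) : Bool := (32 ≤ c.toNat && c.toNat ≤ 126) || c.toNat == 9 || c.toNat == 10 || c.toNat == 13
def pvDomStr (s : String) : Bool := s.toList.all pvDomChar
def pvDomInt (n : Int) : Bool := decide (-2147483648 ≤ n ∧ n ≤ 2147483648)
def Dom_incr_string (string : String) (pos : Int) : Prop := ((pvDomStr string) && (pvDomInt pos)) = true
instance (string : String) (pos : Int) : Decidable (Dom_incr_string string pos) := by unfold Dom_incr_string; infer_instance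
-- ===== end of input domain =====

-- B replaces A's slice-rebuilding tail recursion by one in-place char-list carry sweep (simpler);
-- on inputs whose carry walk involves position -1 A's pos=-1 slices duplicate the string, B returns
-- the intended increment (see D_incr_string below).

-- ===== PORT A =====
-- A's recursion has no structural measure (on bad inputs Python raises IndexError instead of
-- terminating); the port carries fuel that provably suffices on every input A returns on,
-- and returns [] where Python raises (pyGet? = none) or fuel runs out (unreached under Pre_).
def incrA (fuel : Nat) (l : List Char) (p : Int) : List Char :=
  match fuel with
  | 0 => []
  | fuel + 1 =>
    match PySem.List.pyGet? l p with
    | none => []  -- IndexError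
    | some c =>
      let ch := c.toNat + 1
      if 122 < ch then
        incrA fuel
          (PySem.List.slice l none (some p) ++ Char.ofNat 97 :: PySem.List.slice l (some (p + 1)) none)
          (p - 1)
      else
        PySem.List.slice l none (some p) ++ Char.ofNat ch :: PySem.List.slice l (some (p + 1)) none

def incr_string (string : String) (pos : Int) : String :=
  String.mk (incrA (pos.toNat + 2 * string.toList.length + 4) string.toList pos)

-- ===== PORT B =====
-- the while loop of Source B: sweep the carry leftward, setting cells to 'a'; the loop
-- only ever decrements i and exits once i < 0, so fuel (i+1).toNat (supplied by
-- incrB_finish) is exact: it reaches 0 exactly when i reaches -1, where the loop exits anyway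
def incrB_loop (fuel : Nat) (chars : List Char) (i : Int) : List Char × Int :=
  match fuel with
  | 0 => (chars, i)
  | fuel + 1 =>
    if 0 ≤ i then
      match PySem.List.pyGet? chars i with
      | none => (chars, i)  -- Python would raise IndexError here; unreached under Pre_
      | some c =>
        if 122 ≤ c.toNat then incrB_loop fuel (PySem.List.pySetD chars i (Char.ofNat 97)) (i - 1)
        else (chars, i)
    else (chars, i)

-- after the loop: prepend a fresh 'a' on carry-out, else bump the stopping cell
def incrB_finish (chars : List Char) (i : Int) : List Char :=
  let r := incrB_loop (i + 1).toNat chars i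
  if r.2 < 0 then Char.ofNat 97 :: r.1
  else PySem.List.pySetD r.1 r.2
        (Char.ofNat ((PySem.List.pyGetD r.1 r.2 (Char.ofNat 97)).toNat + 1))

def incr_string_alt (string : String) (pos : Int) : String :=
  let chars := string.toList
  String.mk (incrB_finish chars (if pos < 0 then pos + chars.length else pos))

-- ===== PRECONDITION & SPEC =====
-- Pre_ excludes exactly the inputs on which A raises IndexError: pos outside Python's index
-- range, and pos ≤ -2 whose whole leftward prefix s[0..pos] consists of carry chars (≥ 'z'),
-- which drives the recursion off the front of the string.
def Pre_incr_string (string : String) (pos : Int) : Prop :=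
  (-(string.toList.length : Int) ≤ pos ∧ pos < (string.toList.length : Int)) ∧
  (-1 ≤ pos ∨
    ¬ ((string.toList.take (pos + string.toList.length + 1).toNat).all
        (fun c => 122 ≤ c.toNat) = true))
instance (string : String) (pos : Int) : Decidable (Pre_incr_string string pos) := by
  unfold Pre_incr_string; infer_instance

def pvWitness_incr_string : String × Int := ("abc", 0)

-- On inputs whose carry walk involves position -1 (pos = -1, or 0 ≤ pos with s[0..pos] all ≥ 'z'),
-- A's slice string[pos+1:] with pos = -1 is the whole string, so A returns a duplicated string
-- (A('z',-1) = "bz", A('abc',-1) = "abdabc"); B returns the intended counter increment ("aa", "abd").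
def D_incr_string (string : String) (pos : Int) : Prop :=
  pos = -1 ∨
    (0 ≤ pos ∧ pos < (string.toList.length : Int) ∧
      (string.toList.take (pos + 1).toNat).all (fun c => 122 ≤ c.toNat) = true)
instance (string : String) (pos : Int) : Decidable (D_incr_string string pos) := by
  unfold D_incr_string; infer_instance

def Spec_incr_string (string : String) (pos : Int) (out : String) : Prop :=
  ¬ D_incr_string string pos → out = incr_string_alt string pos
instance (string : String) (pos : Int) (out : String) : Decidable (Spec_incr_string string pos out) := by
  unfold Spec_incr_string; infer_instance

def pvDiffWitness_incr_string : String × Int := ("z", -1)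
def pvDiffWitnessOut_incr_string : String × String := ("bz", "aa")

-- ===== CLAIM (what is proved, stated in full; the proofs are below) =====
def Claim_unchanged_incr_string : Prop := ∀ (string : String) (pos : Int), Dom_incr_string string pos → Pre_incr_string string pos → Spec_incr_string string pos (incr_string string pos)
def Claim_changed_incr_string : Prop := Dom_incr_string (pvDiffWitness_incr_string.1) (pvDiffWitness_incr_string.2) ∧ Pre_incr_string (pvDiffWitness_incr_string.1) (pvDiffWitness_incr_string.2) ∧ D_incr_string (pvDiffWitness_incr_string.1) (pvDiffWitness_incr_string.2) ∧ incr_string (pvDiffWitness_incr_string.1) (pvDiffWitness_incr_string.2) = pvDiffWitnessOut_incr_string.1 ∧ incr_string_alt (pvDiffWitness_incr_string.1) (pvDiffWitness_incr_string.2) = pvDiffWitnessOut_incr_string.2 ∧ pvDiffWitnessOut_incr_string.1 ≠ pvDiffWitnessOut_incr_string.2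

-- ===== LEMMAS AND PROOFS =====

-- A's slice rebuild s[:p] ++ [c] ++ s[p+1:] is List.set at the normalized index
theorem sliceSet (l : List Char) (p i : Int) (c : Char)
    (hi0 : 0 ≤ i) (hil : i < l.length)
    (hp : p = i ∨ (p ≤ -2 ∧ p + l.length = i)) :
    PySem.List.slice l none (some p) ++ c :: PySem.List.slice l (some (p + 1)) none
      = l.set i.toNat c := by
  rcases hp with hp | ⟨hp2, hpi⟩
  · subst hp
    rw [PySem.List.slice_to l hi0, PySem.List.slice_from l (by omega)]
    have h1 : (p + 1).toNat = p.toNat + 1 := by omega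
    rw [h1, List.set_eq_take_cons_drop _ (by omega)]
  · obtain ⟨k, hk⟩ : ∃ k : Nat, (k : Int) = -p := ⟨(-p).toNat, by omega⟩
    have hpk1 : p + 1 = -(((k - 1 : Nat)) : Int) := by omega
    rw [hpk1, PySem.List.slice_from_neg_natCast l (k - 1) (by omega)]
    have hpk : p = -(k : Int) := by omega
    rw [hpk, PySem.List.slice_to_neg_natCast l k (by omega)]
    have h1 : l.length - k = i.toNat := by omega
    have h2 : l.length - (k - 1) = i.toNat + 1 := by omega
    rw [h1, h2, List.set_eq_take_cons_drop _ (by omega)]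

theorem readWrap (l : List Char) (p i : Int)
    (hi0 : 0 ≤ i) (hil : i < l.length)
    (hp : p = i ∨ (p ≤ -2 ∧ p + l.length = i)) :
    PySem.List.pyGet? l p = some (l[i.toNat]'(by omega)) := by
  rcases hp with hp | ⟨hp2, hpi⟩
  · subst hp
    exact PySem.List.pyGet?_eq_some_getElem l hi0 hil
  · obtain ⟨k, hk⟩ : ∃ k : Nat, (k : Int) = -p := ⟨(-p).toNat, by omega⟩
    have hpk : p = -(k : Int) := by omega
    rw [hpk, PySem.List.pyGet?_neg_natCast l k (by omega) (by omega)]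
    have hidx : l.length - k = i.toNat := by omega
    rw [hidx, List.getElem?_eq_getElem (by omega)]

-- core: the fueled transliteration of A equals B's sweep-then-finish, whenever the
-- leftward prefix contains a non-carry cell (so the sweep stops at a valid index)
theorem key (fuel : Nat) : ∀ (l : List Char) (p i : Int),
    0 ≤ i → i < l.length →
    (p = i ∨ (p ≤ -2 ∧ p + l.length = i)) →
    (∃ j : Nat, (j : Int) ≤ i ∧ ∃ hj : j < l.length, (l[j]).toNat < 122) →
    i < fuel →
    incrA fuel l p = incrB_finish l i := by
  induction fuel with
  | zero => intro l p i hi0 _ _ _ hfuel; omega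
  | succ f ih =>
    intro l p i hi0 hil hp hinv hfuel
    obtain ⟨j, hji, hjl, hjc⟩ := hinv
    have hread := readWrap l p i hi0 hil hp
    rw [incrA, hread]
    set c := l[i.toNat]'(by omega) with hc
    by_cases hcar : 122 ≤ c.toNat
    · -- carry step
      have hji' : (j : Int) ≤ i - 1 := by
        rcases eq_or_lt_of_le hji with h | h
        · exfalso
          obtain rfl : j = i.toNat := by omega
          rw [hc] at hcar
          omega
        · omega
      have hstep : incrB_loop (i + 1).toNat l i
          = incrB_loop (i - 1 + 1).toNat (PySem.List.pySetD l i (Char.ofNat 97)) (i - 1) := by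
        have hfe : (i + 1).toNat = (i - 1 + 1).toNat + 1 := by omega
        rw [hfe, incrB_loop]
        rw [if_pos hi0, PySem.List.pyGet?_eq_some_getElem l hi0 hil]
        simp [← hc, hcar]
      have hset : PySem.List.pySetD l i (Char.ofNat 97) = l.set i.toNat (Char.ofNat 97) :=
        PySem.List.pySetD_of_nonneg l (Char.ofNat 97) hi0
      have hfin : incrB_finish l i
          = incrB_finish (l.set i.toNat (Char.ofNat 97)) (i - 1) := by
        unfold incrB_finish
        rw [hstep, hset]
      rw [hfin]
      simp only [if_pos (by omega : 122 < c.toNat + 1)]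
      rw [sliceSet l p i _ hi0 hil hp]
      apply ih
      · omega
      · simp; omega
      · rcases hp with hp | ⟨hp2, hpi⟩
        · left; omega
        · right; constructor
          · omega
          · simp; omega
      · refine ⟨j, by omega, by simp; omega, ?_⟩
        rw [List.getElem_set_ne (by omega)]
        exact hjc
      · omega
    · -- stop step: both write the incremented char at i
      have hstop : incrB_loop (i + 1).toNat l i = (l, i) := by
        have hfe : (i + 1).toNat = i.toNat + 1 := by omega
        rw [hfe, incrB_loop]
        rw [if_pos hi0, PySem.List.pyGet?_eq_some_getElem l hi0 hil]
        simp [← hc, hcar]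
      simp only [if_neg (by omega : ¬ 122 < c.toNat + 1)]
      rw [sliceSet l p i _ hi0 hil hp]
      unfold incrB_finish
      rw [hstop]
      simp only [if_neg (by omega : ¬ i < 0)]
      rw [PySem.List.pySetD_of_nonneg l _ hi0]
      congr 2
      rw [PySem.List.pyGetD_eq_getElem l _ hi0 hil]

-- extract a positional witness from a failed `all` over a prefix
theorem notAllWitness (l : List Char) (n : Nat)
    (h : ¬ ((l.take n).all (fun c => 122 ≤ c.toNat) = true)) :
    ∃ j : Nat, j < n ∧ ∃ hj : j < l.length, (l[j]).toNat < 122 := by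
  rw [List.all_eq_true] at h
  push_neg at h
  obtain ⟨x, hmem, hx⟩ := h
  obtain ⟨j, hj, hget⟩ := List.getElem_of_mem hmem
  have hjn : j < min n l.length := by simpa using hj
  refine ⟨j, by omega, by omega, ?_⟩
  have hlx : l[j]'(by omega) = x := by
    rw [← hget, List.getElem_take]
  simp at hx
  rw [hlx]
  omega

-- ===== VERDICT (by name: the statement is the Claim_ definition above) =====
theorem incr_string_spec : Claim_unchanged_incr_string := by
  intro string pos _hdom hpre hnD
  obtain ⟨⟨hlo, hhi⟩, hpre2⟩ := hpre
  unfold incr_string incr_string_alt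
  set l := string.toList with hl
  by_cases hpos : 0 ≤ pos
  · -- entry at a nonnegative index
    have hnall : ¬ ((l.take (pos + 1).toNat).all (fun c => 122 ≤ c.toNat) = true) := by
      intro hall
      exact hnD (Or.inr ⟨hpos, hhi, hall⟩)
    obtain ⟨j, hjn, hjl, hjc⟩ := notAllWitness l _ hnall
    have : ¬ pos < 0 := by omega
    simp only [this]
    exact congrArg String.mk
      (key _ l pos pos hpos hhi (Or.inl rfl) ⟨j, by omega, hjl, hjc⟩ (by omega))
  · -- entry at a negative index; pos = -1 lies inside D_, so pos ≤ -2 here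
    have hne : pos ≠ -1 := fun h => hnD (Or.inl h)
    have hp2 : pos ≤ -2 := by omega
    have hnall : ¬ ((l.take (pos + l.length + 1).toNat).all (fun c => 122 ≤ c.toNat) = true) := by
      rcases hpre2 with h | h
      · omega
      · exact h
    obtain ⟨j, hjn, hjl, hjc⟩ := notAllWitness l _ hnall
    have hlt : pos < 0 := by omega
    simp only [hlt, if_pos]
    exact congrArg String.mk
      (key _ l pos (pos + l.length) (by omega) (by omega) (Or.inr ⟨hp2, rfl⟩)
        ⟨j, by omega, hjl, hjc⟩ (by omega))

theorem incr_string_changed : Claim_changed_incr_string := by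
  unfold Claim_changed_incr_string
  refine ⟨by decide, by decide, by decide, by rfl, by rfl, by decide⟩
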